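-- pv_equiv track=rewrite | github.com/Darvinleo/Python_Workout_code | ch02_strings/e05_pig_latin.py | punct_shifter
-- ===== SOURCE A (Python) =====
-- import string
--
-- def punct_shifter(word):
--     """
--     This function handles punctuation
--     If a word ends with punctuation, then that punctuation
--     is shifted to the end of the translated word.
--     """
--     if word[-1] in string.punctuation + ' ':
--         punct = []
--         for char in reversed(word):
--             if char not in string.punctuation + ' ':
--                 break
--             punct.append(char)
--         return ''.join(list(reversed(punct)))
--     return ''
-- ===== SOURCE B (Python) =====
-- import string
--
-- def punct_shifter(word):
--     """Return the run of trailing punctuation/space characters of word."""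
--     stripped = word.rstrip(string.punctuation + ' ')
--     return word[len(stripped):]
-- ===== Notes on version B (the rewrite author's own statement) =====
-- stated objective: idiomatic
-- what changed: Replaces the guarded backward character scan with list-append and double reverse by a single rstrip boundary computation plus a slice.
import Mathlib
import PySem

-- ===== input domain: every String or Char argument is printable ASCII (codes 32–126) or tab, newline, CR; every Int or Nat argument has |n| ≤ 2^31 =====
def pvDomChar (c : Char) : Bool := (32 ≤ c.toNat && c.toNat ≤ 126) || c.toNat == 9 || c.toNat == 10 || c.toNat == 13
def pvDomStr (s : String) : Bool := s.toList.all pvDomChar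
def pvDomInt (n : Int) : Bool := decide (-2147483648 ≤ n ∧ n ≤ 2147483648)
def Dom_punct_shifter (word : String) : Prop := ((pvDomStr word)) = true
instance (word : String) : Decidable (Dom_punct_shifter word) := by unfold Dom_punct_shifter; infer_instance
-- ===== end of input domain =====

-- B replaces A's guarded backward scan + list build + double reverse by an rstrip boundary
-- computation and a slice (idiomatic); on "" A raises IndexError while B returns "".


-- string.punctuation + ' '
def pvPunct : List Char := "!\"#$%&'()*+,-./:;<=>?@[\\]^_`{|}~ ".toList

-- ===== PORT A =====
-- the for-loop with break: walk the reversed chars, appending while in the set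
def pvALoop (cs : List Char) (acc : List Char) : List Char :=
  match cs with
  | [] => acc
  | c :: rest => if pvPunct.contains c then pvALoop rest (acc ++ [c]) else acc

def punct_shifter (word : String) : String :=
  match PySem.Str.pyGet? word (-1) with
  | none => ""          -- IndexError on word[-1]; excluded by Pre_
  | some last =>
    if pvPunct.contains last then
      String.ofList (pvALoop word.toList.reverse []).reverse
    else ""

-- ===== PORT B =====
def punct_shifter_alt (word : String) : String :=
  let stripped := (word.toList.reverse.dropWhile (fun c => pvPunct.contains c)).reverse
  String.ofList (PySem.List.slice word.toList (some (stripped.length : Int)) none)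

-- ===== PRECONDITION & SPEC =====
-- Pre_ excludes only the empty string, on which A raises IndexError.
def Pre_punct_shifter (word : String) : Prop := word ≠ ""
instance (word : String) : Decidable (Pre_punct_shifter word) := by unfold Pre_punct_shifter; infer_instance
def pvWitness_punct_shifter : String := "hi!"

def Spec_punct_shifter (word : String) (out : String) : Prop := out = punct_shifter_alt word
instance (word : String) (out : String) : Decidable (Spec_punct_shifter word out) := by unfold Spec_punct_shifter; infer_instance

-- ===== CLAIM (what is proved, stated in full; the proofs are below) =====
def Claim_equal_punct_shifter : Prop := ∀ (word : String), Dom_punct_shifter word → Pre_punct_shifter word → Spec_punct_shifter word (punct_shifter word)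

-- ===== LEMMAS AND PROOFS =====
lemma drop_dropWhile_reverse (p : Char → Bool) (l : List Char) :
    List.drop (List.dropWhile p l.reverse).length l = (List.takeWhile p l.reverse).reverse := by
  conv_lhs => rw [show l = (List.dropWhile p l.reverse).reverse ++ (List.takeWhile p l.reverse).reverse by
    rw [← List.reverse_append, List.takeWhile_append_dropWhile, List.reverse_reverse]]
  exact List.drop_left' (by simp)

lemma pvALoop_eq_takeWhile (cs acc : List Char) :
    pvALoop cs acc = acc ++ cs.takeWhile (fun c => pvPunct.contains c) := by
  induction cs generalizing acc with
  | nil => simp [pvALoop]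
  | cons c rest ih =>
    simp only [pvALoop]
    by_cases h : c ∈ pvPunct <;> simp [h, ih]

lemma alt_eq (word : String) :
    punct_shifter_alt word =
      String.ofList (word.toList.reverse.takeWhile (fun c => pvPunct.contains c)).reverse := by
  show String.ofList (PySem.List.slice word.toList
      (some ((((word.toList.reverse.dropWhile (fun c => pvPunct.contains c)).reverse).length : Nat) : Int)) none)
    = _
  rw [PySem.List.slice_from_natCast]
  simp only [List.length_reverse]
  congr 1
  exact drop_dropWhile_reverse _ word.toList

-- ===== VERDICT (by name: the statement is the Claim_ definition above) =====
theorem punct_shifter_spec : Claim_equal_punct_shifter := by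
  intro word _ hpre
  have hne : word.toList ≠ [] := by
    intro h
    exact hpre (by have := congrArg String.ofList h; simpa using this)
  unfold Spec_punct_shifter
  rw [alt_eq]
  unfold punct_shifter
  obtain ⟨c, t, hr⟩ : ∃ c t, word.toList.reverse = c :: t := by
    cases h : word.toList.reverse with
    | nil => exact absurd (by simpa using h) hne
    | cons c t => exact ⟨c, t, rfl⟩
  have hget : PySem.Str.pyGet? word (-1) = some c := by
    simp [PySem.Str.pyGet?, PySem.List.pyGet?_neg_one, List.getLast?_eq_head?_reverse, hr]
  rw [hget]
  dsimp only
  by_cases hc : c ∈ pvPunct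
  · rw [if_pos (by simpa using hc), pvALoop_eq_takeWhile]
    simp
  · have ht : List.takeWhile (fun c => pvPunct.contains c) word.toList.reverse = [] := by
      rw [hr]; simp [hc]
    rw [if_neg (by simpa using hc), ht]
    simp
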